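-- pv_equiv track=rewrite | github.com/yanghoJI/programmers | hash/3_yangho.py | solution
-- ===== SOURCE A (Python) =====
-- from itertools import combinations
--
-- def solution(clothes):
--     answer = 0
--     cateDict = {}
--     for item in clothes:
--         if item[1] in cateDict:
--             cateDict[item[1]] += 1
--         else:
--             cateDict[item[1]] = 1
--
--     keys = cateDict.keys()
--     for i in range(1, len(cateDict) + 1):
--         clist = combinations(keys, i)
--         for com in clist:
--             temp = 1
--             for ca in com:
--                 temp *= cateDict[ca]
--             answer += temp
--     return answer
-- ===== SOURCE B (Python) =====
-- def solution(clothes):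
--     # closed form: product of (count_per_category + 1) minus the empty combination
--     counts = {}
--     for item in clothes:
--         cat = item[1]
--         counts[cat] = counts.get(cat, 0) + 1
--     ans = 1
--     for c in counts.values():
--         ans *= c + 1
--     return ans - 1
-- ===== Notes on version B (the rewrite author's own statement) =====
-- stated objective: faster
-- what changed: B replaces A's explicit enumeration of all non-empty category subsets (summing products over itertools.combinations of every size) with the closed form: product of (category count + 1) over categories, minus 1.
import Mathlib
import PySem

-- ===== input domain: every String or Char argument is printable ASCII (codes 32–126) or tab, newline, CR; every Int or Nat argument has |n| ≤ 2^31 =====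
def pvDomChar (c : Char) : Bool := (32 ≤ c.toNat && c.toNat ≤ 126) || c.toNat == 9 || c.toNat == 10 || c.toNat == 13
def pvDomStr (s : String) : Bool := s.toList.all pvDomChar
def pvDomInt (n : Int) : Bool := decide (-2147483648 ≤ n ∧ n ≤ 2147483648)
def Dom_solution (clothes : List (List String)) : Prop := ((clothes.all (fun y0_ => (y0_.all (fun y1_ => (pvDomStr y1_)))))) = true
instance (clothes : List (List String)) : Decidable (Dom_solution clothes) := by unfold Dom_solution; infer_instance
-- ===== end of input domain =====

-- B computes the same count by the closed form ∏(category count + 1) − 1 instead of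
-- enumerating all non-empty category subsets (objective: faster, asymptotically).

-- ===== PORT A =====
-- item[1] (raises IndexError when the item has fewer than 2 entries; Pre_ excludes that)
def pvCat (item : List String) : String := (PySem.List.pyGet? item 1).getD ""

-- the counting loop of A
def pvCateDictA (clothes : List (List String)) : PySem.Dict String Int :=
  clothes.foldl (fun d item =>
    if d.contains (pvCat item) then d.modify (pvCat item) 0 (· + 1)
    else d.insert (pvCat item) 1) PySem.Dict.empty

def solution (clothes : List (List String)) : Int :=
  let cateDict := pvCateDictA clothes
  let keys := cateDict.keys
  (PySem.List.pyRange 1 ((cateDict.size : Int) + 1)).foldl (fun answer i =>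
    (PySem.List.combinations keys i.toNat).foldl (fun answer com =>
      answer + com.foldl (fun temp ca => temp * cateDict.getD ca 0) 1) answer) 0

-- ===== PORT B =====
-- the counting loop of B
def pvCountsB (clothes : List (List String)) : PySem.Dict String Int :=
  clothes.foldl (fun d item =>
    d.insert (pvCat item) (d.getD (pvCat item) 0 + 1)) PySem.Dict.empty

def solution_alt (clothes : List (List String)) : Int :=
  let counts := pvCountsB clothes
  (counts.values.foldl (fun ans c => ans * (c + 1)) 1) - 1

-- ===== PRECONDITION & SPEC =====
-- Pre_ excludes exactly the inputs where Python A raises IndexError on item[1] (an item with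
-- fewer than two entries); B raises there too.
def Pre_solution (clothes : List (List String)) : Prop := ∀ item ∈ clothes, 2 ≤ item.length
instance (clothes : List (List String)) : Decidable (Pre_solution clothes) := by unfold Pre_solution; infer_instance
def pvWitness_solution : List (List String) := [["a", "shirt"], ["b", "shirt"], ["c", "pants"]]

def Spec_solution (clothes : List (List String)) (out : Int) : Prop := out = solution_alt clothes
instance (clothes : List (List String)) (out : Int) : Decidable (Spec_solution clothes out) := by unfold Spec_solution; infer_instance

-- ===== CLAIM (what is proved, stated in full; the proofs are below) =====
def Claim_equal_solution : Prop := ∀ (clothes : List (List String)), Dom_solution clothes → Pre_solution clothes → Spec_solution clothes (solution clothes)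

-- ===== LEMMAS AND PROOFS =====

-- sum of products of the size-i combinations
def pvS (vs : List Int) (i : Nat) : Int := ((PySem.List.combinations vs i).map List.prod).sum
-- sum over all sizes 0 .. length
def pvF (vs : List Int) : Int := ((List.range (vs.length + 1)).map (pvS vs)).sum

theorem pvS_zero (vs : List Int) : pvS vs 0 = 1 := by
  simp [pvS, PySem.List.combinations_zero]

theorem pvS_cons_succ (v : Int) (vs : List Int) (i : Nat) :
    pvS (v :: vs) (i + 1) = v * pvS vs i + pvS vs (i + 1) := by
  simp only [pvS, PySem.List.combinations_cons_succ, List.map_append, List.sum_append,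
    List.map_map]
  have : (List.prod ∘ fun c => v :: c) = fun c : List Int => v * c.prod := by
    funext c; simp
  rw [this, List.sum_map_mul_left]

theorem pvS_overflow (vs : List Int) {i : Nat} (h : vs.length < i) : pvS vs i = 0 := by
  simp [pvS, PySem.List.combinations_eq_nil_of_length_lt vs h]

theorem pvShift (vs : List Int) :
    ((List.range (vs.length + 1)).map (fun i => pvS vs (i + 1))).sum = pvF vs - 1 := by
  have h1 : ((List.range (vs.length + 2)).map (pvS vs)).sum
      = pvF vs + pvS vs (vs.length + 1) := by
    rw [List.range_succ, List.map_append, List.sum_append]; simp [pvF]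
  have h2 : ((List.range (vs.length + 2)).map (pvS vs)).sum
      = pvS vs 0 + ((List.range (vs.length + 1)).map (fun i => pvS vs (i + 1))).sum := by
    rw [List.range_succ_eq_map]; simp [List.map_map, Function.comp_def]
  rw [pvS_overflow vs (i := vs.length + 1) (by omega)] at h1
  rw [pvS_zero] at h2
  omega

theorem pvShift0 (vs : List Int) :
    ((List.range vs.length).map (fun i => pvS vs (i + 1))).sum = pvF vs - 1 := by
  have h := pvShift vs
  rw [List.range_succ, List.map_append, List.sum_append] at h
  simp only [List.map_cons, List.map_nil, List.sum_cons, List.sum_nil,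
    pvS_overflow vs (i := vs.length + 1) (by omega)] at h
  omega

theorem pvF_eq (vs : List Int) : pvF vs = (vs.map (· + 1)).prod := by
  induction vs with
  | nil => simp [pvF, pvS_zero]
  | cons v vs ih =>
    have hlen : (v :: vs).length = vs.length + 1 := rfl
    have : pvF (v :: vs)
        = pvS (v :: vs) 0 + ((List.range (vs.length + 1)).map (fun i => pvS (v :: vs) (i + 1))).sum := by
      rw [pvF, hlen, List.range_succ_eq_map]
      simp [List.map_map, Function.comp_def]
    rw [this, pvS_zero]
    have : ((List.range (vs.length + 1)).map (fun i => pvS (v :: vs) (i + 1))).sum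
        = v * pvF vs + (pvF vs - 1) := by
      rw [List.map_congr_left (fun i _ => pvS_cons_succ v vs i), PySem.List.sum_map_add_int,
        List.sum_map_mul_left, pvShift vs]
      rfl
    rw [this, ih]
    simp [List.prod_cons]; ring

theorem pvFoldlMul (l : List String) (f : String → Int) (a : Int) :
    l.foldl (fun t x => t * f x) a = a * (l.map f).prod := by
  induction l generalizing a with
  | nil => simp
  | cons x xs ih => simp [ih, mul_assoc]

theorem pvFoldlMulInt (l : List Int) (a : Int) :
    l.foldl (fun t c => t * (c + 1)) a = a * (l.map (· + 1)).prod := by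
  induction l generalizing a with
  | nil => simp
  | cons x xs ih => simp [ih, mul_assoc]

-- the category-count loops of A and B build the same dict
theorem pvSameDict (clothes : List (List String)) :
    pvCateDictA clothes = pvCountsB clothes := by
  unfold pvCateDictA pvCountsB
  apply PySem.List.foldl_congr_mem
  intro d item _
  by_cases h : d.contains (pvCat item) = true
  · simp [h, PySem.Dict.modify]
  · simp only [Bool.not_eq_true] at h
    rw [if_neg (by simp [h]), PySem.Dict.getD_of_not_contains d 0 h]
    norm_num

theorem pvRangeOne (n : Nat) :
    PySem.List.pyRange 1 ((n : Int) + 1) = (List.range n).map (fun j : Nat => (j : Int) + 1) := by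
  induction n with
  | zero =>
    show PySem.List.pyRange 1 1 = _
    simp [PySem.List.pyRange]
  | succ n ih =>
    have : ((n + 1 : Nat) : Int) + 1 = ((n : Int) + 1) + 1 := by push_cast; ring
    rw [this, PySem.List.pyRange_one_succ_right (by omega), ih, List.range_succ]
    simp

theorem solution_eq_alt (clothes : List (List String)) :
    solution clothes = solution_alt clothes := by
  simp only [solution, solution_alt]
  rw [pvSameDict clothes]
  set d : PySem.Dict String Int := pvCountsB clothes with hd
  have hnd : d.keys.Nodup := by
    rw [hd]
    unfold pvCountsB
    exact PySem.Dict.nodup_keys_foldl_insert_key clothes pvCat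
      (fun d item => d.getD (pvCat item) 0 + 1) PySem.Dict.empty PySem.Dict.nodup_keys_empty
  have hvals : d.values = d.keys.map (fun k => d.getD k 0) :=
    PySem.Dict.values_eq_map_keys d hnd 0
  have hsize : d.size = d.keys.length := by
    simp [PySem.Dict.size, PySem.Dict.keys]
  -- the B side
  rw [pvFoldlMulInt, one_mul, hvals, List.map_map]
  -- the A side: turn the nested folds into a sum of pvS values
  simp only [PySem.List.foldl_add, zero_add]
  rw [hsize, pvRangeOne d.keys.length, List.map_map]
  have hmap : ∀ j : Nat, j ∈ List.range d.keys.length →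
      ((PySem.List.combinations d.keys (((j : Int) + 1).toNat)).map
        (List.foldl (fun temp ca => temp * d.getD ca 0) 1)).sum
      = pvS (d.keys.map (fun k => d.getD k 0)) (j + 1) := by
    intro j _
    have ht : (((j : Int) + 1)).toNat = j + 1 := by omega
    rw [ht, pvS, PySem.List.combinations_map, List.map_map]
    congr 1
    apply List.map_congr_left
    intro c _
    simp [pvFoldlMul]
  simp only [Function.comp_def]
  rw [List.map_congr_left hmap]
  have hlen : (d.keys.map (fun k => d.getD k 0)).length = d.keys.length := by simp
  rw [← hlen, pvShift0, pvF_eq, List.map_map]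
  simp [Function.comp_def]

-- ===== VERDICT (by name: the statement is the Claim_ definition above) =====
theorem solution_spec : Claim_equal_solution := by
  intro clothes _ _
  unfold Spec_solution
  exact solution_eq_alt clothes
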